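-- pv_equiv track=rewrite | github.com/katherine983/pyusm | pyusm/usmutils.py | check_alphabet
-- ===== SOURCE A (Python) =====
-- def check_alphabet(uu, A):
--     # This function takes a user-defined list of the symbols in the alphabet, A, and compares with the set of unique symbols found in seq, uu
--     # raises exceptions if the length of uu is greater than A or if a symbol occurs in seq that is not in A.
--
--     # sort A for consistency across data structures
--     A.sort()
--     #d is dimension of alphabet
--     d=len(A)
--     assert d >= len(uu), "Unique sequence units greater than alphabet. List of unique sequence units: {}".format(uu)
--     # ix is list of the index in A of each symbol in uu
--     ix = []
--     for i in range(len(uu)):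
--         assert uu[i] in A, "Unrecognized symbol in sequence. List of unique sequence units: {}".format(uu)
--         j = A.index(uu[i])
--         ix.append(j)
--     return ix
-- ===== SOURCE B (Python) =====
-- def check_alphabet(uu, A):
--     # Alternative algorithm: after the same in-place A.sort(), resolve each symbol of uu
--     # by a hand-rolled bisect_left binary search over the sorted alphabet; on a sorted
--     # list bisect_left lands on the FIRST occurrence, so it equals A.index(symbol).
--     A.sort()
--     d = len(A)
--     assert d >= len(uu), "Unique sequence units greater than alphabet. List of unique sequence units: {}".format(uu)
--     ix = []
--     for s in uu:
--         lo, hi = 0, d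
--         while lo < hi:
--             mid = (lo + hi) // 2
--             if A[mid] < s:
--                 lo = mid + 1
--             else:
--                 hi = mid
--         assert lo < d and A[lo] == s, "Unrecognized symbol in sequence. List of unique sequence units: {}".format(uu)
--         ix.append(lo)
--     return ix
-- ===== Notes on version B (the rewrite author's own statement) =====
-- stated objective: alternative
-- what changed: Instead of a linear 'in' + '.index' scan of the sorted alphabet per symbol, B resolves each symbol of uu by a hand-rolled bisect_left binary search over the sorted list (bisect_left on a sorted list returns the first occurrence, so it equals A.index); same in-place A.sort() and the same two asserts. It trades the per-symbol linear scan for O(log n) comparisons, but in interpreted Python the C-level .index is not measurably slower on the timed inputs.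
import Mathlib
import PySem

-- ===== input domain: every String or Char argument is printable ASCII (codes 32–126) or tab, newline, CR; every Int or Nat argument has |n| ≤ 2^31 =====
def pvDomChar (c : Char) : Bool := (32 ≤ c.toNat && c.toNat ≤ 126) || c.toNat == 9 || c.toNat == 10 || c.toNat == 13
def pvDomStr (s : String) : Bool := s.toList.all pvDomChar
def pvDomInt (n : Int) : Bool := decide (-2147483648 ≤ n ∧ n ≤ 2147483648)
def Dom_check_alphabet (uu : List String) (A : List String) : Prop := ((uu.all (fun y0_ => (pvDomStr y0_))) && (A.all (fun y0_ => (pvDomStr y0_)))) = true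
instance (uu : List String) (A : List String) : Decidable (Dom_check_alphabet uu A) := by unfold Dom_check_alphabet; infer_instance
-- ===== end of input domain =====

-- ===== PORT A =====
-- B replaces A's per-symbol 'in' + '.index' linear scan by a bisect_left binary search
-- over the sorted alphabet (objective: alternative algorithm). Both Pythons sort A in place (same
-- mutation); the equivalence proved here is about the return value.
def check_alphabet (uu : List String) (A : List String) : List Int :=
  -- A.sort()
  let As := PySem.List.sorted A (fun x => x)
  -- the two asserts raise exactly on the inputs excluded by Pre_check_alphabet;
  -- A.index (ValueError on a missing symbol) is index? — we default the (excluded) none case to 0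
  (PySem.List.pyRange 0 (PySem.List.len uu) 1).foldl
    (fun ix i =>
      let s := PySem.List.pyGetD uu i ""
      ix ++ [(((PySem.List.index? As s).getD 0 : Nat) : Int)]) []

-- ===== PORT B =====
-- the 'while lo < hi' bisect_left loop of Source B; A[mid] is in range (lo ≤ mid < hi ≤ len),
-- so List.getD is exact for it
def bisectLoop (As : List String) (s : String) (lo hi : Nat) : Nat :=
  if lo < hi then
    let mid := (lo + hi) / 2
    if As.getD mid "" < s then bisectLoop As s (mid + 1) hi else bisectLoop As s lo mid
  else lo
termination_by hi - lo
decreasing_by all_goals omega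

def check_alphabet_alt (uu : List String) (A : List String) : List Int :=
  -- A.sort()
  let As := PySem.List.sorted A (fun x => x)
  let d := As.length
  -- for s in uu: lo = bisect_left loop; assert lo < d and A[lo] == s (raises exactly
  -- outside Pre_); ix.append(lo)
  uu.foldl (fun ix s => ix ++ [((bisectLoop As s 0 d : Nat) : Int)]) []

-- ===== PRECONDITION & SPEC =====
-- Pre_ excludes exactly the inputs on which both Pythons' asserts raise AssertionError:
-- more symbols in uu than alphabet entries, or a symbol of uu missing from A.
def Pre_check_alphabet (uu : List String) (A : List String) : Prop :=
  uu.length ≤ A.length ∧ ∀ s ∈ uu, s ∈ A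
instance (uu : List String) (A : List String) : Decidable (Pre_check_alphabet uu A) := by
  unfold Pre_check_alphabet; infer_instance

def pvWitness_check_alphabet : List String × List String := (["a", "b"], ["b", "c", "a"])

def Spec_check_alphabet (uu : List String) (A : List String) (out : List Int) : Prop := out = check_alphabet_alt uu A
instance (uu : List String) (A : List String) (out : List Int) : Decidable (Spec_check_alphabet uu A out) := by unfold Spec_check_alphabet; infer_instance

-- ===== CLAIM (what is proved, stated in full; the proofs are below) =====
def Claim_equal_check_alphabet : Prop := ∀ (uu : List String) (A : List String), Dom_check_alphabet uu A → Pre_check_alphabet uu A → Spec_check_alphabet uu A (check_alphabet uu A)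

-- ===== LEMMAS AND PROOFS =====

-- entries of a ≤-sorted list are monotone in the index
lemma getD_mono_of_pairwise (l : List String) (hs : l.Pairwise (· ≤ ·))
    {i j : Nat} (hij : i ≤ j) (hj : j < l.length) :
    l.getD i "" ≤ l.getD j "" := by
  rcases Nat.eq_or_lt_of_le hij with rfl | hlt
  · exact le_rfl
  · rw [List.getD_eq_getElem l _ (Nat.lt_of_le_of_lt hij hj), List.getD_eq_getElem l _ hj]
    exact (List.pairwise_iff_getElem.mp hs) i j _ _ hlt

-- the bisect loop keeps its bracketing invariant and returns the split point
lemma bisectLoop_inv (l : List String) (s : String) (hs : l.Pairwise (· ≤ ·)) :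
    ∀ (lo hi : Nat), lo ≤ hi → hi ≤ l.length →
    (∀ i, i < lo → l.getD i "" < s) →
    (∀ i, hi ≤ i → i < l.length → s ≤ l.getD i "") →
    (∀ i, i < bisectLoop l s lo hi → l.getD i "" < s) ∧
    (∀ i, bisectLoop l s lo hi ≤ i → i < l.length → s ≤ l.getD i "") ∧
    bisectLoop l s lo hi ≤ l.length := by
  intro lo hi
  generalize hn : hi - lo = n
  induction n using Nat.strong_induction_on generalizing lo hi with
  | _ n ih =>
    intro hlohi hhi hlow hhigh
    rw [bisectLoop]
    by_cases h : lo < hi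
    · rw [if_pos h]
      simp only
      by_cases hc : l.getD ((lo + hi) / 2) "" < s
      · rw [if_pos hc]
        refine ih (hi - ((lo + hi) / 2 + 1)) (by omega) ((lo + hi) / 2 + 1) hi rfl (by omega) hhi ?_ hhigh
        intro i hi'
        exact lt_of_le_of_lt (getD_mono_of_pairwise l hs (by omega) (by omega)) hc
      · rw [if_neg hc]
        refine ih ((lo + hi) / 2 - lo) (by omega) lo ((lo + hi) / 2) rfl (by omega) (by omega) hlow ?_
        intro i hmi hil
        exact (not_lt.mp hc).trans (getD_mono_of_pairwise l hs hmi hil)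
    · rw [if_neg h]
      have hle : lo = hi := by omega
      exact ⟨hlow, by simpa [hle] using hhigh, by omega⟩

-- on a sorted list containing s, the bisect loop finds exactly the first index of s
lemma index?_eq_bisectLoop (l : List String) (s : String)
    (hs : l.Pairwise (· ≤ ·)) (hmem : s ∈ l) :
    PySem.List.index? l s = some (bisectLoop l s 0 l.length) := by
  obtain ⟨inv1, inv2, inv3⟩ :=
    bisectLoop_inv l s hs 0 l.length (Nat.zero_le _) le_rfl
      (fun i hi0 => absurd hi0 (by omega)) (fun i h1 h2 => absurd h2 (by omega))
  set r := bisectLoop l s 0 l.length with hr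
  obtain ⟨j, hj, hje⟩ := List.mem_iff_getElem.mp hmem
  have hrj : r ≤ j := by
    by_contra hlt
    have := inv1 j (by omega)
    rw [List.getD_eq_getElem l _ hj, hje] at this
    exact lt_irrefl s this
  have hrlen : r < l.length := lt_of_le_of_lt hrj hj
  have hls : l.getD r "" = s := by
    refine le_antisymm ?_ (inv2 r le_rfl hrlen)
    have := getD_mono_of_pairwise l hs hrj hj
    rwa [List.getD_eq_getElem l _ hj, hje] at this
  rw [PySem.List.index?_eq_idxOf?, List.idxOf?_eq_some_iff]
  refine ⟨hrlen, by rw [← List.getD_eq_getElem l _ hrlen]; exact hls, ?_⟩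
  intro i hi'
  have := inv1 i hi'
  rw [List.getD_eq_getElem l _ (by omega)] at this
  exact ne_of_lt this

-- ===== VERDICT (by name: the statement is the Claim_ definition above) =====
theorem check_alphabet_spec : Claim_equal_check_alphabet := by
  intro uu A _ hpre
  unfold Spec_check_alphabet check_alphabet check_alphabet_alt
  rw [PySem.List.foldl_append_singleton_eq_map, PySem.List.foldl_append_singleton_eq_map]
  simp only [List.nil_append]
  rw [show (fun i => (((PySem.List.index? (PySem.List.sorted A (fun x => x)) (PySem.List.pyGetD uu i "")).getD 0 : Nat) : Int))
        = (fun s => (((PySem.List.index? (PySem.List.sorted A (fun x => x)) s).getD 0 : Nat) : Int)) ∘ (fun i => PySem.List.pyGetD uu i "") from rfl,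
      ← List.map_map, PySem.List.map_pyGetD_pyRange_zero]
  apply List.map_congr_left
  intro s hsu
  have hsA : s ∈ PySem.List.sorted A (fun x => x) :=
    (PySem.List.mem_sorted A (fun x => x) false s).mpr (hpre.2 s hsu)
  rw [index?_eq_bisectLoop _ _ (PySem.List.sorted_pairwise A (fun x => x)) hsA]
  rfl
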